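-- pv_equiv track=rewrite | github.com/hitochan777/kata | atcoder/agc/agc022/A.py | get_diverse_word
-- ===== SOURCE A (Python) =====
-- from typing import Optional
-- from string import ascii_lowercase
--
-- def get_diverse_word(s: str) -> Optional[str]:
--     if len(s) == 26:
--         return None
--
--     for c in ascii_lowercase:
--         if c in s:
--             continue
--
--         return s + c
--
--     return None
-- ===== SOURCE B (Python) =====
-- from typing import Optional
--
-- def get_diverse_word(s: str) -> Optional[str]:
--     if len(s) == 26:
--         return None
--     # One pass over s building a 26-bit occupancy mask, then bit arithmetic:
--     # mask ^ (mask+1) sets exactly the bits up to and including the lowest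
--     # zero bit of mask, so its bit_length-1 is the index of the first
--     # unused letter.
--     mask = 0
--     for ch in s:
--         if 'a' <= ch <= 'z':
--             mask |= 1 << (ord(ch) - 97)
--     if mask == (1 << 26) - 1:
--         return None
--     return s + chr(97 + (mask ^ (mask + 1)).bit_length() - 1)
-- ===== Notes on version B (the rewrite author's own statement) =====
-- stated objective: alternative
-- what changed: Instead of scanning the alphabet with substring tests against s, B makes one pass over s building a 26-bit occupancy bitmask and then extracts the lowest unset bit with (mask ^ (mask+1)).bit_length()-1, keeping the len==26 guard.
import Mathlib
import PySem

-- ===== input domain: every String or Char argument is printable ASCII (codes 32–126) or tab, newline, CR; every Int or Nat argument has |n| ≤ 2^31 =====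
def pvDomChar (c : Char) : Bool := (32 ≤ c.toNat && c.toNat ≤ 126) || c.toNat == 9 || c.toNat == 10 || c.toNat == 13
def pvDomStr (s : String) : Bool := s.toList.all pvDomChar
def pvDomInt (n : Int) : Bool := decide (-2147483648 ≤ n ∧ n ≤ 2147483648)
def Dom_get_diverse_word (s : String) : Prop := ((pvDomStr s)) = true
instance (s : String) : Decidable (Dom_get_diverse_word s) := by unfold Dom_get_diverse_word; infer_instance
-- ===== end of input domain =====

-- B replaces A's per-letter early-exit scan by one pass over s building a 26-bit occupancy mask plus a bit-arithmetic lowest-zero-bit extraction (alternative).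


def pvAlphabet : List Char := "abcdefghijklmnopqrstuvwxyz".toList

-- ===== PORT A =====
-- the for-loop over ascii_lowercase with early return
def pvLoopA (s : List Char) : List Char → Option String
  | [] => none
  | c :: rest => if c ∈ s then pvLoopA s rest else some (String.ofList (s ++ [c]))

def get_diverse_word (s : String) : Option String :=
  if s.toList.length = 26 then none
  else pvLoopA s.toList pvAlphabet

-- ===== PORT B =====
-- mask |= 1 << (ord(ch) - 97) for each lowercase ch of s, one fold over s
def pvMask (l : List Char) : Nat :=
  l.foldl (fun m c => if 97 ≤ c.toNat ∧ c.toNat ≤ 122 then m ||| (1 <<< (c.toNat - 97)) else m) 0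

def get_diverse_word_alt (s : String) : Option String :=
  if s.toList.length = 26 then none
  else if pvMask s.toList = 2 ^ 26 - 1 then none
  else
    -- (mask ^ (mask+1)).bit_length() - 1 = Nat.log2 (mask ^^^ (mask+1)) (the xor is ≥ 1)
    some (String.ofList (s.toList ++
      [Char.ofNat (97 + Nat.log2 (pvMask s.toList ^^^ (pvMask s.toList + 1)))]))

-- ===== PRECONDITION & SPEC =====
def Spec_get_diverse_word (s : String) (out : Option String) : Prop := out = get_diverse_word_alt s
instance (s : String) (out : Option String) : Decidable (Spec_get_diverse_word s out) := by unfold Spec_get_diverse_word; infer_instance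

-- ===== CLAIM (what is proved, stated in full; the proofs are below) =====
def Claim_equal_get_diverse_word : Prop := ∀ (s : String), Dom_get_diverse_word s → Spec_get_diverse_word s (get_diverse_word s)

-- ===== LEMMAS AND PROOFS =====

theorem chr_toNat (n : Nat) (h : n < 55296) : (Char.ofNat n).toNat = n := by
  have hv : n.isValidChar := Or.inl h
  simp [Char.ofNat, hv, Char.ofNatAux, Char.toNat]

theorem chr_eq_iff (n : Nat) (h : n < 55296) (c : Char) : Char.ofNat n = c ↔ c.toNat = n := by
  constructor
  · intro he; rw [← he, chr_toNat n h]
  · intro he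
    apply Char.ext
    have h1 := chr_toNat n h
    simp only [Char.toNat] at h1 he
    exact UInt32.toNat_inj.mp (by omega)

-- bit i of the mask records membership of letter 'a'+i
theorem pvMask_testBit_aux (i : Nat) (hi : i < 26) :
    ∀ (l : List Char) (m : Nat),
      (l.foldl (fun m c => if 97 ≤ c.toNat ∧ c.toNat ≤ 122 then m ||| (1 <<< (c.toNat - 97)) else m) m).testBit i
        = (m.testBit i || decide (Char.ofNat (97 + i) ∈ l)) := by
  intro l
  induction l with
  | nil => simp
  | cons c rest ih =>
    intro m
    simp only [List.foldl_cons, ih, List.mem_cons]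
    by_cases hc : 97 ≤ c.toNat ∧ c.toNat ≤ 122
    · rw [if_pos hc]
      simp only [Nat.shiftLeft_eq, one_mul, Nat.testBit_or]
      by_cases heq : c.toNat - 97 = i
      · have he : Char.ofNat (97 + i) = c := (chr_eq_iff _ (by omega) c).mpr (by omega)
        have : (2 ^ (c.toNat - 97)).testBit i = true := by
          rw [heq]; simp [Nat.testBit_two_pow]
        simp [this, he]
      · have hne : Char.ofNat (97 + i) ≠ c := by
          intro he
          have := (chr_eq_iff _ (by omega) c).mp he
          omega
        have : (2 ^ (c.toNat - 97)).testBit i = false := by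
          simp [Nat.testBit_two_pow, heq]
        simp [this, hne, Bool.or_assoc, Bool.or_comm]
    · have hne : Char.ofNat (97 + i) ≠ c := by
        intro he
        have := (chr_eq_iff _ (by omega) c).mp he
        omega
      rw [if_neg hc]
      simp [hne]

theorem pvMask_testBit (s : List Char) (i : Nat) (hi : i < 26) :
    (pvMask s).testBit i = decide (Char.ofNat (97 + i) ∈ s) := by
  simpa using pvMask_testBit_aux i hi s 0

theorem pvMask_lt (s : List Char) : pvMask s < 2 ^ 26 := by
  unfold pvMask
  generalize h0 : (0 : Nat) = m0
  have hm0 : m0 < 2 ^ 26 := by omega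
  clear h0
  induction s generalizing m0 with
  | nil => simpa using hm0
  | cons c rest ih =>
    simp only [List.foldl_cons]
    apply ih
    by_cases hc : 97 ≤ c.toNat ∧ c.toNat ≤ 122
    · rw [if_pos hc]
      apply Nat.or_lt_two_pow hm0
      rw [Nat.shiftLeft_eq, one_mul]
      exact Nat.pow_lt_pow_right (by norm_num) (by omega)
    · rw [if_neg hc]; exact hm0

theorem xor_succ_even (m : Nat) (h : m % 2 = 0) : m ^^^ (m + 1) = 1 := by
  apply Nat.eq_of_testBit_eq
  intro j
  cases j with
  | zero => simp [Nat.testBit_zero, h, Nat.add_mod]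
  | succ j =>
    have h1 : (m + 1) / 2 = m / 2 := by omega
    simp [Nat.testBit_succ, Nat.xor_div_two, h1]

theorem xor_succ_odd (m : Nat) (h : m % 2 = 1) : m ^^^ (m + 1) = 2 * ((m / 2) ^^^ (m / 2 + 1)) + 1 := by
  apply Nat.eq_of_testBit_eq
  intro j
  cases j with
  | zero => simp [Nat.testBit_zero, h, Nat.add_mod, Nat.mul_add_mod]
  | succ j =>
    have h1 : (m + 1) / 2 = m / 2 + 1 := by omega
    have h2 : (2 * ((m / 2) ^^^ (m / 2 + 1)) + 1) / 2 = (m / 2) ^^^ (m / 2 + 1) := by omega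
    simp [Nat.testBit_succ, Nat.xor_div_two, h1, h2]

theorem log2_two_mul_add_one (n : Nat) (h : 1 ≤ n) : Nat.log2 (2 * n + 1) = Nat.log2 n + 1 := by
  rw [Nat.log2_def]
  have h1 : 2 * n + 1 ≥ 2 := by omega
  have h2 : (2 * n + 1) / 2 = n := by omega
  simp [h1, h2]

-- Nat.log2 (m ^^^ (m+1)) is the index of the lowest zero bit of m
theorem log2_xor_succ : ∀ (m k : Nat), (∀ j, j < k → m.testBit j = true) → m.testBit k = false →
    Nat.log2 (m ^^^ (m + 1)) = k := by
  intro m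
  induction m using Nat.strong_induction_on with
  | _ m ih =>
    intro k hlt hk
    cases k with
    | zero =>
      have hm : m % 2 = 0 := by simpa [Nat.testBit_zero] using hk
      rw [xor_succ_even m hm]
      rfl
    | succ k =>
      have hm : m % 2 = 1 := by
        have := hlt 0 (by omega)
        simpa [Nat.testBit_zero] using this
      rw [xor_succ_odd m hm, log2_two_mul_add_one _ (by
        rcases Nat.eq_zero_or_pos ((m / 2) ^^^ (m / 2 + 1)) with h | h
        · exact absurd (Nat.xor_eq_zero_iff.mp h) (by omega)
        · omega)]
      congr 1
      apply ih (m / 2) (by omega)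
      · intro j hj
        have := hlt (j + 1) (by omega)
        simpa [Nat.testBit_succ] using this
      · simpa [Nat.testBit_succ] using hk

-- find? over a mapped range', positioned at the first success
theorem find?_range' (p : Char → Bool) :
    ∀ (n a k : Nat), k < n → (∀ j, j < k → p (Char.ofNat (a + j)) = false) →
      p (Char.ofNat (a + k)) = true →
      ((List.range' a n).map Char.ofNat).find? p = some (Char.ofNat (a + k)) := by
  intro n
  induction n with
  | zero => omega
  | succ n ih =>
    intro a k hk hlt hp
    rw [List.range'_succ, List.map_cons]
    cases k with
    | zero =>
      simp only [Nat.add_zero] at hp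
      simp [List.find?, hp]
    | succ k =>
      have h0 : p (Char.ofNat a) = false := by simpa using hlt 0 (by omega)
      simp only [List.find?, h0]
      rw [show a + (k + 1) = a + 1 + k from by omega]
      exact ih (a + 1) k (by omega)
        (fun j hj => by
          have := hlt (j + 1) (by omega)
          rwa [show a + (j + 1) = a + 1 + j from by omega] at this)
        (by rwa [show a + (k + 1) = a + 1 + k from by omega] at hp)

theorem pvLoopA_eq_find (s : List Char) (l : List Char) :
    pvLoopA s l = (l.find? (fun c => ¬ (c ∈ s))).map (fun c => String.ofList (s ++ [c])) := by
  induction l with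
  | nil => rfl
  | cons c rest ih =>
    by_cases h : c ∈ s <;> simp [pvLoopA, List.find?, h, ih]

theorem pvAlphabet_eq : pvAlphabet = (List.range' 97 26).map Char.ofNat := by decide

-- ===== VERDICT (by name: the statement is the Claim_ definition above) =====
theorem get_diverse_word_spec : Claim_equal_get_diverse_word := by
  intro s _
  unfold Spec_get_diverse_word get_diverse_word get_diverse_word_alt
  by_cases hlen : s.toList.length = 26
  · rw [if_pos hlen, if_pos hlen]
  · rw [if_neg hlen, if_neg hlen, pvLoopA_eq_find, pvAlphabet_eq]
    have hbit : ∀ i, i < 26 → (pvMask s.toList).testBit i = decide (Char.ofNat (97 + i) ∈ s.toList) :=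
      fun i hi => pvMask_testBit s.toList i hi
    by_cases hfull : pvMask s.toList = 2 ^ 26 - 1
    · rw [if_pos hfull, List.find?_eq_none.2, Option.map_none]
      intro c hc
      simp only [List.mem_map, List.mem_range'_1] at hc
      obtain ⟨x, ⟨hx1, hx2⟩, rfl⟩ := hc
      have h1 : (pvMask s.toList).testBit (x - 97) = true := by
        rw [hfull, Nat.testBit_two_pow_sub_one]
        simpa using by omega
      rw [hbit (x - 97) (by omega)] at h1
      have hmem : Char.ofNat (97 + (x - 97)) ∈ s.toList := of_decide_eq_true h1
      rw [show 97 + (x - 97) = x from by omega] at hmem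
      simpa using hmem
    · rw [if_neg hfull]
      have hex : ∃ i, i < 26 ∧ (pvMask s.toList).testBit i = false := by
        by_contra h
        push_neg at h
        apply hfull
        apply Nat.eq_of_testBit_eq
        intro i
        rw [Nat.testBit_two_pow_sub_one]
        by_cases hi : i < 26
        · have := h i hi
          simp only [hi, decide_true]
          rcases Bool.eq_false_or_eq_true ((pvMask s.toList).testBit i) with hb | hb
          · exact hb
          · exact absurd hb this
        · have hlt2 : pvMask s.toList < 2 ^ i :=
            lt_of_lt_of_le (pvMask_lt s.toList) (Nat.pow_le_pow_right (by norm_num) (by omega))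
          simp [Nat.testBit_lt_two_pow hlt2, hi]
      classical
      set k := Nat.find hex with hkdef
      have hk26 : k < 26 := (Nat.find_spec hex).1
      have hkbit : (pvMask s.toList).testBit k = false := (Nat.find_spec hex).2
      have hkmin : ∀ j, j < k → (pvMask s.toList).testBit j = true := by
        intro j hj
        rcases Bool.eq_false_or_eq_true ((pvMask s.toList).testBit j) with hb | hb
        · exact hb
        · exact absurd ⟨by omega, hb⟩ (Nat.find_min hex hj)
      rw [log2_xor_succ (pvMask s.toList) k hkmin hkbit]
      rw [find?_range' _ 26 97 k hk26
        (fun j hj => by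
          have := hbit j (by omega)
          rw [hkmin j hj] at this
          simp [of_decide_eq_true this.symm])
        (by
          have := hbit k hk26
          rw [hkbit] at this
          simp [of_decide_eq_false this.symm])]
      simp
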